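-- pv_equiv track=rewrite | github.com/bthornton191/adams_vscode | adams-cmd-lsp/adams_cmd_lsp/macros.py | _compute_min_prefixes
-- ===== SOURCE A (Python) =====
-- def _compute_min_prefixes(names):
--     """Return a dict mapping each name to its minimum unique prefix length.
--
--     The shortest prefix that unambiguously identifies a name among its siblings
--     is computed case-insensitively.  If a name is a prefix of another name the
--     full-length is required.
--
--     Args:
--         names: iterable of sibling parameter names
--
--     Returns:
--         dict[str, int] — name → minimum unique prefix length
--     """
--     lower_names = [n.lower() for n in names]
--     result = {}
--     for i, name in enumerate(lower_names):
--         for prefix_len in range(1, len(name) + 1):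
--             prefix = name[:prefix_len]
--             conflicts = sum(
--                 1 for j, other in enumerate(lower_names)
--                 if j != i and other.startswith(prefix)
--             )
--             if conflicts == 0:
--                 result[names[i]] = prefix_len
--                 break
--         else:
--             result[names[i]] = len(name)
--     return result
-- ===== SOURCE B (Python) =====
-- def _compute_min_prefixes(names):
--     """Faster re-implementation: count every nonempty lowercased prefix once,
--     then read off, per name, the first prefix length whose count is 1."""
--     lower = [n.lower() for n in names]
--     counts = {}
--     for ln in lower:
--         for end in range(1, len(ln) + 1):
--             p = ln[:end]
--             counts[p] = counts.get(p, 0) + 1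
--     result = {}
--     for name, ln in zip(names, lower):
--         ans = len(ln)
--         for end in range(1, len(ln) + 1):
--             if counts[ln[:end]] == 1:
--                 ans = end
--                 break
--         result[name] = ans
--     return result
-- ===== Notes on version B (the rewrite author's own statement) =====
-- stated objective: faster
-- what changed: B builds one dictionary counting every nonempty lowercased prefix across all names and answers each name by the first prefix length with count 1, replacing A's per-name per-prefix scan over the whole sibling list.
import Mathlib
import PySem

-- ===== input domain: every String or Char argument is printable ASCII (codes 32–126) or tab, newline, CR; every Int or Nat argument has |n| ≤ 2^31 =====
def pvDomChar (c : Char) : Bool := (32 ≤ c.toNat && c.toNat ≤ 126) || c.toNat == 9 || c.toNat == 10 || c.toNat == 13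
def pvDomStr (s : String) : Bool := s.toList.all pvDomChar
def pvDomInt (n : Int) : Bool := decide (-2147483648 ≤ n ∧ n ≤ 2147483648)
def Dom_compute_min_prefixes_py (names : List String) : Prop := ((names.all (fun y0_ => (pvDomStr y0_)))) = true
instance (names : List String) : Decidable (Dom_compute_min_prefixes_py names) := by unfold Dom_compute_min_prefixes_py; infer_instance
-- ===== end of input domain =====

-- B replaces A's per-name scan over all sibling names with a dictionary counting every
-- nonempty lowercased prefix once, then reads the first prefix length whose count is 1
-- (objective: faster — the inner scan over the sibling list disappears).

-- ===== PORT A =====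
-- lower_names = [n.lower() for n in names]  (strings handled as char lists via PySem.Chars)
def pvLowerAll (names : List String) : List (List Char) :=
  names.map (fun n => PySem.Chars.lower n.toList)

-- conflicts = sum(1 for j, other in enumerate(lower_names) if j != i and other.startswith(prefix))
def pvConflicts (lower : List (List Char)) (i : Int) (pre : List Char) : Int :=
  (PySem.List.enumerate lower).foldl
    (fun acc jo => if jo.1 ≠ i ∧ PySem.Chars.startswith jo.2 pre = true then acc + 1 else acc) 0

-- the inner for/else loop: first prefix_len in range(1, len+1) with no conflicts, else len(name)
def pvFirstLen (lower : List (List Char)) (i : Int) (name : List Char) : Int :=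
  match (PySem.List.pyRange 1 ((name.length : Int) + 1) 1).find?
      (fun L => pvConflicts lower i (PySem.List.slice name none (some L)) == 0) with
  | some L => L
  | none => (name.length : Int)

def compute_min_prefixes_py (names : List String) : List (String × Int) :=
  let lower := pvLowerAll names
  ((PySem.List.enumerate lower).foldl
     (fun result inm =>
        result.insert (PySem.List.pyGetD names inm.1 "") (pvFirstLen lower inm.1 inm.2))
     PySem.Dict.empty).items

-- ===== PORT B =====
-- counts[p] = number of times p occurs as a nonempty prefix of a lowered name
-- (Source B's counts[p] = counts.get(p, 0) + 1 loop; the lookup counts[...] below is getD,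
--  exact because every queried key was inserted by this loop)
def pvCounts (lower : List (List Char)) : PySem.Dict (List Char) Int :=
  lower.foldl
    (fun d ln =>
      (PySem.List.pyRange 1 ((ln.length : Int) + 1) 1).foldl
        (fun d L => d.insert (PySem.List.slice ln none (some L))
                             (d.getD (PySem.List.slice ln none (some L)) 0 + 1)) d)
    PySem.Dict.empty

-- ans = first end in range(1, len+1) with counts[ln[:end]] == 1, else len(ln)
def pvAnsB (counts : PySem.Dict (List Char) Int) (ln : List Char) : Int :=
  match (PySem.List.pyRange 1 ((ln.length : Int) + 1) 1).find?
      (fun L => counts.getD (PySem.List.slice ln none (some L)) 0 == 1) with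
  | some L => L
  | none => (ln.length : Int)

def compute_min_prefixes_py_alt (names : List String) : List (String × Int) :=
  let lower := names.map (fun n => PySem.Chars.lower n.toList)
  let counts := pvCounts lower
  ((names.zip lower).foldl
     (fun result p => result.insert p.1 (pvAnsB counts p.2)) PySem.Dict.empty).items

-- ===== PRECONDITION & SPEC =====
def Spec_compute_min_prefixes_py (names : List String) (out : List (String × Int)) : Prop := out = compute_min_prefixes_py_alt names
instance (names : List String) (out : List (String × Int)) : Decidable (Spec_compute_min_prefixes_py names out) := by unfold Spec_compute_min_prefixes_py; infer_instance

-- ===== CLAIM (what is proved, stated in full; the proofs are below) =====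
def Claim_equal_compute_min_prefixes_py : Prop := ∀ (names : List String), Dom_compute_min_prefixes_py names → Spec_compute_min_prefixes_py names (compute_min_prefixes_py names)

-- ===== LEMMAS AND PROOFS =====

lemma pv_count_prefixes (ln p : List Char) :
    List.count p ((PySem.List.pyRange 1 ((ln.length : Int) + 1) 1).map
      (fun L => PySem.List.slice ln none (some L)))
    = if p ≠ [] ∧ p <+: ln then 1 else 0 := by
  have hl : (PySem.List.pyRange 1 ((ln.length : Int) + 1) 1).map
      (fun L => PySem.List.slice ln none (some L))
      = (List.range ln.length).map (fun k => ln.take (k+1)) := by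
    apply List.ext_getElem
    · simp [PySem.List.length_pyRange_one]
    · intro k h1 h2
      simp only [List.getElem_map, List.getElem_range]
      rw [PySem.List.getElem_pyRange_one]
      rw [PySem.List.slice_to ln (by omega)]
      congr 1
      omega
  rw [hl]
  have hnd : ((List.range ln.length).map (fun k => ln.take (k+1))).Nodup := by
    apply List.Nodup.map_on _ (List.nodup_range)
    intro x hx y hy hxy
    simp only [List.mem_range] at hx hy
    have hlx : (ln.take (x+1)).length = x+1 := by simp; omega
    have hly : (ln.take (y+1)).length = y+1 := by simp; omega
    rw [hxy] at hlx
    omega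
  have hmem : p ∈ (List.range ln.length).map (fun k => ln.take (k+1)) ↔ (p ≠ [] ∧ p <+: ln) := by
    simp only [List.mem_map, List.mem_range]
    constructor
    · rintro ⟨k, hk, rfl⟩
      constructor
      · intro h
        have hh := congrArg List.length h
        simp only [List.length_take, List.length_nil] at hh
        omega
      · exact List.take_prefix _ _
    · rintro ⟨hne, hpre⟩
      have hlen : p.length ≤ ln.length := hpre.length_le
      have hpos : 0 < p.length := List.length_pos_iff.mpr hne
      refine ⟨p.length - 1, by omega, ?_⟩
      have := List.prefix_iff_eq_take.mp hpre
      rw [Nat.sub_add_cancel hpos]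
      exact this.symm
  split_ifs with h
  · exact List.count_eq_one_of_mem hnd (hmem.mpr h)
  · exact List.count_eq_zero_of_not_mem (fun hm => h (hmem.mp hm))

lemma pv_counts_aux (p : List Char) :
    ∀ (ls : List (List Char)) (d : PySem.Dict (List Char) Int),
    (ls.foldl
      (fun d ln =>
        (PySem.List.pyRange 1 ((ln.length : Int) + 1) 1).foldl
          (fun d L => d.insert (PySem.List.slice ln none (some L))
                               (d.getD (PySem.List.slice ln none (some L)) 0 + 1)) d) d).getD p 0
      = d.getD p 0 + (ls.countP (fun ln => decide (p ≠ [] ∧ p <+: ln)) : Int) := by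
  intro ls
  induction ls with
  | nil => intro d; simp
  | cons ln t ih =>
    intro d
    simp only [List.foldl_cons, List.countP_cons, ih]
    rw [← List.foldl_map (f := fun L => PySem.List.slice ln none (some L))
          (g := fun (d : PySem.Dict (List Char) Int) x => d.insert x (d.getD x 0 + 1))]
    rw [PySem.Dict.getD_foldl_insert_add_one]
    rw [pv_count_prefixes]
    by_cases h : p ≠ [] ∧ p <+: ln <;> simp [h]
    ring

lemma pv_counts_getD (lower : List (List Char)) (p : List Char) :
    (pvCounts lower).getD p 0
      = (lower.countP (fun ln => decide (p ≠ [] ∧ p <+: ln)) : Int) := by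
  unfold pvCounts
  rw [pv_counts_aux]
  simp

lemma pv_countP_enumerate_aux (Q : List Char → Prop) [DecidablePred Q] :
    ∀ (t : List (List Char)) (s j : Int), j < s →
    (PySem.List.enumerate t s).countP (fun jo => decide (jo.1 ≠ j ∧ Q jo.2))
      = t.countP (fun x => decide (Q x)) := by
  intro t
  induction t with
  | nil => intro s j _; simp [PySem.List.enumerate_nil]
  | cons x t ih =>
    intro s j hj
    rw [PySem.List.enumerate_cons, List.countP_cons, List.countP_cons, ih (s+1) j (by omega)]
    have : (decide ((s ≠ j) ∧ Q x)) = decide (Q x) := by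
      by_cases h : Q x <;> simp [h]
      omega
    simp [this]

lemma pv_countP_enumerate (Q : List Char → Prop) [DecidablePred Q] :
    ∀ (ls : List (List Char)) (s : Int) (i : Nat) (_ : i < ls.length) (_ : Q ls[i]),
    (PySem.List.enumerate ls s).countP
        (fun jo => decide (jo.1 ≠ s + (i : Int) ∧ Q jo.2)) + 1
      = ls.countP (fun x => decide (Q x)) := by
  intro ls
  induction ls with
  | nil => intro s i hi; exact absurd hi (by simp)
  | cons x t ih =>
    intro s i hi hQ
    rw [PySem.List.enumerate_cons, List.countP_cons, List.countP_cons]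
    cases i with
    | zero =>
      simp only [List.getElem_cons_zero] at hQ
      have h1 : (decide ((s ≠ s + ((0:Nat) : Int)) ∧ Q x)) = false := by simp
      have h2 : (PySem.List.enumerate t (s+1)).countP
          (fun jo => decide (jo.1 ≠ s + ((0:Nat) : Int) ∧ Q jo.2))
          = t.countP (fun x => decide (Q x)) := by
        apply pv_countP_enumerate_aux Q t (s+1) _ (by omega)
      rw [h1, h2]
      simp [hQ]
    | succ k =>
      simp only [List.getElem_cons_succ] at hQ
      have h3 : (fun (jo : Int × List Char) => decide (jo.1 ≠ s + ((k+1 : Nat) : Int) ∧ Q jo.2))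
          = (fun jo => decide (jo.1 ≠ (s+1) + ((k : Nat) : Int) ∧ Q jo.2)) := by
        funext jo
        have he : s + ((k+1 : Nat) : Int) = (s+1) + ((k : Nat) : Int) := by push_cast; ring
        rw [he]
      have h1 : (decide ((s ≠ s + ((k+1 : Nat) : Int)) ∧ Q x)) = decide (Q x) := by
        by_cases h : Q x <;> simp [h]; omega
      rw [h1, h3, ← ih (s+1) k (by simpa using hi) hQ]
      by_cases h : Q x <;> simp [h]

lemma pv_find?_congr {α : Type} (l : List α) (p q : α → Bool)
    (h : ∀ x ∈ l, p x = q x) : l.find? p = l.find? q := by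
  induction l with
  | nil => rfl
  | cons x t ih =>
    simp only [List.find?_cons]
    rw [h x (by simp)]
    cases q x
    · exact ih (fun y hy => h y (by simp [hy]))
    · rfl

lemma pv_conflicts_eq (lower : List (List Char)) (i : Nat) (hi : i < lower.length)
    (p : List Char) (hpre : p <+: lower[i]) :
    pvConflicts lower (i : Int) p + 1
      = (lower.countP (fun o => PySem.Chars.startswith o p) : Int) := by
  unfold pvConflicts
  rw [PySem.List.foldl_ite_add_one
        (p := fun jo : Int × List Char => jo.1 ≠ (i : Int) ∧ PySem.Chars.startswith jo.2 p = true)]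
  have h := pv_countP_enumerate (fun o => PySem.Chars.startswith o p = true) lower 0 i hi
      ((PySem.Chars.startswith_iff _ _).mpr hpre)
  simp only [zero_add] at h ⊢
  have hcc : lower.countP (fun x => decide (PySem.Chars.startswith x p = true))
      = lower.countP (fun o => PySem.Chars.startswith o p) := by
    apply List.countP_congr; intro o _; simp
  omega

lemma pv_firstLen_eq (lower : List (List Char)) (i : Nat) (hi : i < lower.length) :
    pvFirstLen lower (i : Int) lower[i] = pvAnsB (pvCounts lower) lower[i] := by
  unfold pvFirstLen pvAnsB
  have hf : (PySem.List.pyRange 1 ((lower[i].length : Int) + 1) 1).find?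
        (fun L => pvConflicts lower (i : Int) (PySem.List.slice lower[i] none (some L)) == 0)
      = (PySem.List.pyRange 1 ((lower[i].length : Int) + 1) 1).find?
        (fun L => (pvCounts lower).getD (PySem.List.slice lower[i] none (some L)) 0 == 1) := by
    apply pv_find?_congr
    intro L hL
    rw [PySem.List.mem_pyRange_one] at hL
    set ln := lower[i] with hln
    have hsl : PySem.List.slice ln none (some L) = ln.take L.toNat :=
      PySem.List.slice_to ln (by omega)
    have hpre : ln.take L.toNat <+: ln := List.take_prefix _ _
    have hne : ln.take L.toNat ≠ [] := by
      intro h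
      have := congrArg List.length h
      simp only [List.length_take, List.length_nil] at this
      omega
    have hc := pv_conflicts_eq lower i hi (ln.take L.toNat) (by rw [← hln]; exact hpre)
    have hg : (pvCounts lower).getD (ln.take L.toNat) 0
        = (lower.countP (fun o => PySem.Chars.startswith o (ln.take L.toNat)) : Int) := by
      rw [pv_counts_getD]
      congr 1
      apply List.countP_congr
      intro o _
      simp [PySem.Chars.startswith_iff, hne]
    rw [hsl]
    have : (pvCounts lower).getD (ln.take L.toNat) 0
        = pvConflicts lower (i : Int) (ln.take L.toNat) + 1 := by rw [hc, hg]
    rw [this]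
    have hb : ∀ a : Int, ((a == 0) = (a + 1 == 1)) := by
      intro a
      rcases eq_or_ne a 0 with h0 | h0
      · subst h0; decide
      · have h1 : a + 1 ≠ 1 := by omega
        simp [h0, h1]
    exact hb _
  rw [hf]

lemma pv_outer (ns : List String) :
    ∀ (tn : List String) (k : Nat) (d : PySem.Dict String Int),
    tn = ns.drop k →
    ((PySem.List.enumerate ((pvLowerAll ns).drop k) (k : Int)).foldl
       (fun result inm =>
          result.insert (PySem.List.pyGetD ns inm.1 "") (pvFirstLen (pvLowerAll ns) inm.1 inm.2)) d)
    = ((tn.zip ((pvLowerAll ns).drop k)).foldl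
       (fun result p => result.insert p.1 (pvAnsB (pvCounts (pvLowerAll ns)) p.2)) d) := by
  intro tn
  induction tn with
  | nil =>
    intro k d h
    have hl : (pvLowerAll ns).drop k = [] := by
      unfold pvLowerAll
      rw [← List.map_drop, ← h]
      rfl
    rw [hl]
    simp [PySem.List.enumerate_nil]
  | cons n tn' ih =>
    intro k d h
    have hk : ns[k]? = some n := by
      have h0 : (ns.drop k)[0]? = some n := by rw [← h]; rfl
      rw [List.getElem?_drop] at h0
      simpa using h0
    have hklt : k < ns.length := by
      have := List.getElem?_eq_some_iff.mp hk
      exact this.1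
    have hl : (pvLowerAll ns).drop k
        = PySem.Chars.lower n.toList :: (pvLowerAll ns).drop (k+1) := by
      unfold pvLowerAll
      rw [← List.map_drop, ← h, ← List.map_drop]
      have : ns.drop (k+1) = tn' := by
        have := congrArg List.tail h
        simpa [List.tail_drop] using this.symm
      rw [this]
      rfl
    rw [hl, PySem.List.enumerate_cons, List.zip_cons_cons, List.foldl_cons, List.foldl_cons]
    have hlow_k : (pvLowerAll ns)[k]'(by unfold pvLowerAll; simpa using hklt)
        = PySem.Chars.lower n.toList := by
      unfold pvLowerAll
      rw [List.getElem_map]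
      obtain ⟨_, hv⟩ := List.getElem?_eq_some_iff.mp hk
      rw [hv]
    have hstep :
        d.insert (PySem.List.pyGetD ns (k : Int) "") (pvFirstLen (pvLowerAll ns) (k : Int) (PySem.Chars.lower n.toList))
        = d.insert n (pvAnsB (pvCounts (pvLowerAll ns)) (PySem.Chars.lower n.toList)) := by
      have h1 : PySem.List.pyGetD ns (k : Int) "" = n := by
        rw [PySem.List.pyGetD_natCast]
        rw [List.getD_eq_getElem?_getD, hk]
        rfl
      have h2 := pv_firstLen_eq (pvLowerAll ns) k (by unfold pvLowerAll; simpa using hklt)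
      rw [hlow_k] at h2
      rw [h1, h2]
    rw [hstep]
    have hcast : (k : Int) + 1 = ((k+1 : Nat) : Int) := by push_cast; ring
    rw [hcast]
    exact ih (k+1) _ (by
      have := congrArg List.tail h
      simpa [List.tail_drop] using this)

-- ===== VERDICT (by name: the statement is the Claim_ definition above) =====
theorem compute_min_prefixes_py_spec : Claim_equal_compute_min_prefixes_py := by
  intro names _
  unfold Spec_compute_min_prefixes_py compute_min_prefixes_py compute_min_prefixes_py_alt
  have h := pv_outer names names 0 PySem.Dict.empty (by simp)
  simp only [List.drop_zero, Nat.cast_zero] at h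
  simp only [pvLowerAll] at *
  rw [h]
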